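-- pv_equiv track=rewrite | github.com/SanderRuud/hackathon-tt-py-clankers-gone-rogue | tt/tt/class_emit.py | ts_type_to_python_annotation
-- ===== SOURCE A (Python) =====
-- def ts_type_to_python_annotation(ts_type: str | None) -> str | None:
--     """Minimal ``string`` / ``number`` / ``boolean`` / ``void`` mapping."""
--     if not ts_type:
--         return None
--     t = ts_type.strip()
--     if t in ("string", "str"):
--         return "str"
--     if t in ("number", "float"):
--         return "float"
--     if t in ("boolean", "bool"):
--         return "bool"
--     if t in ("void",):
--         return "None"
--     if t.endswith("[]"):
--         inner = ts_type[:-2].strip()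
--         inn = ts_type_to_python_annotation(inner)
--         if inn:
--             return f"list[{inn}]"
--         return "list"
--     return None
-- ===== SOURCE B (Python) =====
-- _BASE = {
--     "string": "str", "str": "str",
--     "number": "float", "float": "float",
--     "boolean": "bool", "bool": "bool",
--     "void": "None",
-- }
--
--
-- def ts_type_to_python_annotation(ts_type: str | None) -> str | None:
--     """Iterative array-suffix peel loop, then rebuild the annotation outward."""
--     if not ts_type:
--         return None
--     x = ts_type
--     depth = 0
--     while True:
--         t = x.strip()
--         core = _BASE.get(t)
--         if core is not None:
--             break
--         if t.endswith("[]"):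
--             x = x[:-2].strip()
--             depth += 1
--             continue
--         break
--     if core is None:
--         if depth == 0:
--             return None
--         depth -= 1
--         core = "list"
--     for _ in range(depth):
--         core = f"list[{core}]"
--     return core
-- ===== Notes on version B (the rewrite author's own statement) =====
-- stated objective: alternative
-- what changed: Replaces the self-recursion over array suffixes with an explicit peel loop that counts array depth (base keywords resolved by one dict lookup), then rebuilds the nested list annotation outward with a for loop.
import Mathlib
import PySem

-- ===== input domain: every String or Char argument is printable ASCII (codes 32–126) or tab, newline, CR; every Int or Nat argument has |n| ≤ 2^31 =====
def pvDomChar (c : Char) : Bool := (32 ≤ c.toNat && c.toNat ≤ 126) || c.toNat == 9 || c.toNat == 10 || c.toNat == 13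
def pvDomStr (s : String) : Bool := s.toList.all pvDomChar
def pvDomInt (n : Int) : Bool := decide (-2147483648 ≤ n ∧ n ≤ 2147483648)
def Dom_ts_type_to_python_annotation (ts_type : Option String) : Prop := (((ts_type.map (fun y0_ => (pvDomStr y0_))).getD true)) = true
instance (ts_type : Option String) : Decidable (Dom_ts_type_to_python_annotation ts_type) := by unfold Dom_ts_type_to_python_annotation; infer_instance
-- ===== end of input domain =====

-- B replaces A's self-recursion with an explicit peel loop counting array depth plus an outward rebuild; alternative decomposition, same cost.


-- termination helpers (cited by both ports' decreasing_by): strip never lengthens, and x[:-2].strip() is strictly shorter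
theorem pvStripLen (cs : List Char) : (PySem.Chars.strip cs).length ≤ cs.length := by
  have a := List.length_dropWhile_le PySem.Chars.isspace (List.dropWhile PySem.Chars.isspace cs).reverse
  have b := List.length_dropWhile_le PySem.Chars.isspace cs
  simp only [PySem.Chars.strip, PySem.Chars.rstrip, PySem.Chars.lstrip, List.length_reverse] at *
  omega

theorem pvPeelLen (cs : List Char) (h : cs ≠ []) :
    (PySem.Chars.strip (PySem.List.slice cs none (some (-2)))).length < cs.length := by
  rw [PySem.List.slice_to_neg_ofNat cs 2 (by omega)]
  have h1 := pvStripLen (List.take (cs.length - 2) cs)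
  have h2 : 0 < cs.length := List.length_pos_iff.mpr h
  simp only [List.length_take] at h1
  omega

-- endswith (strip cs) "[]" forces cs nonempty (used by B's loop for termination)
theorem pvEndswithNeNil (cs : List Char)
    (h : PySem.Chars.endswith (PySem.Chars.strip cs) "[]".toList = true) : cs ≠ [] := by
  intro hnil; subst hnil; simp [PySem.Chars.endswith, PySem.Chars.strip, PySem.Chars.lstrip,
    PySem.Chars.rstrip, List.isSuffixOf] at h

-- ===== PORT A =====
-- recursive core of A, on code points (strings handled via .toList per the PySem convention)
def tsA (cs : List Char) : Option (List Char) :=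
  if _hem : cs.isEmpty = true then none          -- "if not ts_type: return None"
  else
    let t := PySem.Chars.strip cs
    if t = "string".toList ∨ t = "str".toList then some "str".toList
    else if t = "number".toList ∨ t = "float".toList then some "float".toList
    else if t = "boolean".toList ∨ t = "bool".toList then some "bool".toList
    else if t = "void".toList then some "None".toList
    else if PySem.Chars.endswith t "[]".toList then
      -- inner = ts_type[:-2].strip()  (on the UN-stripped string, as in A)
      match tsA (PySem.Chars.strip (PySem.List.slice cs none (some (-2)))) with
      | some inn => if inn ≠ [] then some ("list[".toList ++ inn ++ "]".toList)
                    else some "list".toList   -- "if inn: … ; return 'list'"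
      | none => some "list".toList
    else none
termination_by cs.length
decreasing_by exact pvPeelLen cs (by simpa using _hem)

def ts_type_to_python_annotation (ts_type : Option String) : Option String :=
  match ts_type with
  | none => none
  | some s => (tsA s.toList).map (fun cs => String.ofList cs)

-- ===== PORT B =====
-- the dict _BASE of Source B
def pvBase : PySem.Dict (List Char) (List Char) :=
  PySem.Dict.ofList [("string".toList, "str".toList), ("str".toList, "str".toList),
    ("number".toList, "float".toList), ("float".toList, "float".toList),
    ("boolean".toList, "bool".toList), ("bool".toList, "bool".toList),
    ("void".toList, "None".toList)]

-- the while-loop of Source B: returns (_BASE.get(t) at loop exit, depth at loop exit)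
def pvPeel (x : List Char) (depth : Nat) : Option (List Char) × Nat :=
  let t := PySem.Chars.strip x
  match PySem.Dict.get? pvBase t with
  | some c => (some c, depth)
  | none =>
    if he : PySem.Chars.endswith t "[]".toList then
      pvPeel (PySem.Chars.strip (PySem.List.slice x none (some (-2)))) (depth + 1)
    else (none, depth)
termination_by x.length
decreasing_by exact pvPeelLen x (pvEndswithNeNil x he)

-- the rebuild for-loop of Source B
def pvWrap (core : List Char) (n : Nat) : List Char :=
  (List.range n).foldl (fun r _ => "list[".toList ++ r ++ "]".toList) core

def ts_type_to_python_annotation_alt (ts_type : Option String) : Option String :=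
  match ts_type with
  | none => none
  | some s =>
    if s.toList.isEmpty then none      -- "if not ts_type: return None"
    else
      match pvPeel s.toList 0 with
      | (some c, d) => some (String.ofList (pvWrap c d))
      | (none, d) => if d = 0 then none else some (String.ofList (pvWrap "list".toList (d - 1)))

-- ===== PRECONDITION & SPEC =====
def Spec_ts_type_to_python_annotation (ts_type : Option String) (out : Option String) : Prop := out = ts_type_to_python_annotation_alt ts_type
instance (ts_type : Option String) (out : Option String) : Decidable (Spec_ts_type_to_python_annotation ts_type out) := by unfold Spec_ts_type_to_python_annotation; infer_instance

-- ===== CLAIM (what is proved, stated in full; the proofs are below) =====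
def Claim_equal_ts_type_to_python_annotation : Prop := ∀ (ts_type : Option String), Dom_ts_type_to_python_annotation ts_type → Spec_ts_type_to_python_annotation ts_type (ts_type_to_python_annotation ts_type)

-- ===== LEMMAS AND PROOFS =====

theorem pvWrap_zero (c : List Char) : pvWrap c 0 = c := rfl

theorem pvWrap_succ (c : List Char) (n : Nat) :
    pvWrap c (n + 1) = "list[".toList ++ pvWrap c n ++ "]".toList := by
  simp [pvWrap, List.range_succ]

theorem pvWrap_ne_nil (c : List Char) (h : c ≠ []) (n : Nat) : pvWrap c n ≠ [] := by
  cases n with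
  | zero => simpa [pvWrap_zero] using h
  | succ m => rw [pvWrap_succ]; simp

theorem pvPeel_depth_le (x : List Char) (d : Nat) : d ≤ (pvPeel x d).2 := by
  fun_induction pvPeel x d with
  | case1 => simp
  | case2 x d t hc he ih => omega
  | case3 => simp

-- the dict lookup written as A's chain of membership tests
theorem pvBase_get (t : List Char) :
    PySem.Dict.get? pvBase t =
      if t = "string".toList ∨ t = "str".toList then some "str".toList
      else if t = "number".toList ∨ t = "float".toList then some "float".toList
      else if t = "boolean".toList ∨ t = "bool".toList then some "bool".toList
      else if t = "void".toList then some "None".toList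
      else none := by
  have hb : pvBase = PySem.Dict.mk [("string".toList, "str".toList), ("str".toList, "str".toList),
    ("number".toList, "float".toList), ("float".toList, "float".toList),
    ("boolean".toList, "bool".toList), ("bool".toList, "bool".toList),
    ("void".toList, "None".toList)] := rfl
  rw [hb]
  simp only [PySem.Dict.get?]
  by_cases h1 : t = "string".toList
  · subst h1; decide
  by_cases h2 : t = "str".toList
  · subst h2; decide
  by_cases h3 : t = "number".toList
  · subst h3; decide
  by_cases h4 : t = "float".toList
  · subst h4; decide
  by_cases h5 : t = "boolean".toList
  · subst h5; decide
  by_cases h6 : t = "bool".toList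
  · subst h6; decide
  by_cases h7 : t = "void".toList
  · subst h7; decide
  have e : ∀ k : List Char, t ≠ k → (k == t) = false := fun k hk => by
    simp only [beq_eq_false_iff_ne, ne_eq]; exact fun h => hk h.symm
  have e1 : ("string".toList == t) = false := e _ h1
  have e2 : ("str".toList == t) = false := e _ h2
  have e3 : ("number".toList == t) = false := e _ h3
  have e4 : ("float".toList == t) = false := e _ h4
  have e5 : ("boolean".toList == t) = false := e _ h5
  have e6 : ("bool".toList == t) = false := e _ h6
  have e7 : ("void".toList == t) = false := e _ h7
  simp only [List.find?_cons, e1, e2, e3, e4, e5, e6, e7, List.find?_nil, Option.map_none]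
  rw [if_neg (not_or.mpr ⟨h1, h2⟩), if_neg (not_or.mpr ⟨h3, h4⟩), if_neg (not_or.mpr ⟨h5, h6⟩),
    if_neg h7]

-- tsA with its falsy guard removed and its keyword chain folded back into the _BASE lookup
theorem tsA_unfold (x : List Char) (hx : ¬ x.isEmpty = true) :
    tsA x =
      match PySem.Dict.get? pvBase (PySem.Chars.strip x) with
      | some c => some c
      | none =>
        if PySem.Chars.endswith (PySem.Chars.strip x) "[]".toList then
          match tsA (PySem.Chars.strip (PySem.List.slice x none (some (-2)))) with
          | some inn => if inn ≠ [] then some ("list[".toList ++ inn ++ "]".toList)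
                        else some "list".toList
          | none => some "list".toList
        else none := by
  rw [tsA, dif_neg hx, pvBase_get]
  split_ifs <;> simp_all

-- any core the loop finds is a value of _BASE, hence a nonempty string
theorem pvPeel_core_ne_nil (x : List Char) (d : Nat) :
    ∀ c dep, pvPeel x d = (some c, dep) → c ≠ [] := by
  fun_induction pvPeel x d with
  | case1 x d t c' hc =>
    intro c dep hp
    have hcc : c' = c := by injection hp with h1 _; injection h1
    subst hcc
    rw [pvBase_get] at hc
    split_ifs at hc <;> (injection hc with h; subst h; simp)
  | case2 x d t hc he ih => exact ih
  | case3 x d t hc he => intro c dep hp; simp at hp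

-- A's recursion computed from B's loop state
theorem pvKey (x : List Char) (d : Nat) :
    tsA x =
      (match pvPeel x d with
       | (some c, dep) => some (pvWrap c (dep - d))
       | (none, dep) => if dep = d then none else some (pvWrap "list".toList (dep - d - 1))) := by
  fun_induction pvPeel x d with
  | case1 x d t c hc =>
    have ht : PySem.Dict.get? pvBase (PySem.Chars.strip x) = some c := hc
    have hx : ¬ x.isEmpty = true := by
      intro hxb
      have hxe : x = [] := by simpa using hxb
      rw [hxe, show PySem.Dict.get? pvBase (PySem.Chars.strip ([] : List Char)) = none from by decide] at ht
      simp at ht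
    rw [tsA_unfold x hx, ht]
    simp [pvWrap_zero]
  | case2 x d t hc he ih =>
    have ht : PySem.Dict.get? pvBase (PySem.Chars.strip x) = none := hc
    have hx : ¬ x.isEmpty = true := by simpa using pvEndswithNeNil x he
    rw [tsA_unfold x hx, ht, if_pos he, ih]
    rcases hp : pvPeel (PySem.Chars.strip (PySem.List.slice x none (some (-2)))) (d + 1) with ⟨core, dep⟩
    have hdep : d + 1 ≤ dep := by
      have := pvPeel_depth_le (PySem.Chars.strip (PySem.List.slice x none (some (-2)))) (d + 1)
      rw [hp] at this; exact this
    cases core with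
    | some c =>
      have hcne : c ≠ [] := pvPeel_core_ne_nil _ _ c dep hp
      simp only
      rw [if_pos (pvWrap_ne_nil c hcne (dep - (d + 1)))]
      have h1 : dep - d = (dep - (d + 1)) + 1 := by omega
      rw [h1, pvWrap_succ]
    | none =>
      by_cases hdd : dep = d + 1
      · subst hdd
        simp [pvWrap_zero]
      · simp only [if_neg hdd]
        rw [if_pos (pvWrap_ne_nil "list".toList (by simp) (dep - (d + 1) - 1))]
        have hne : ¬ dep = d := by omega
        rw [if_neg hne]
        have h1 : dep - d - 1 = (dep - (d + 1) - 1) + 1 := by omega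
        rw [h1, pvWrap_succ]
  | case3 x d t hc he =>
    have ht : PySem.Dict.get? pvBase (PySem.Chars.strip x) = none := hc
    by_cases hx : x.isEmpty = true
    · have hxe : x = [] := by simpa using hx
      subst hxe
      rw [tsA]
      simp
    · rw [tsA_unfold x hx, ht, if_neg he]
      simp

-- ===== VERDICT (by name: the statement is the Claim_ definition above) =====
theorem ts_type_to_python_annotation_spec : Claim_equal_ts_type_to_python_annotation := by
  intro ts_type _
  unfold Spec_ts_type_to_python_annotation
  cases ts_type with
  | none => rfl
  | some s =>
    simp only [ts_type_to_python_annotation, ts_type_to_python_annotation_alt]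
    by_cases hs : s.toList.isEmpty
    · rw [tsA, dif_pos hs, if_pos hs]
      rfl
    · rw [if_neg hs, pvKey s.toList 0]
      rcases hp : pvPeel s.toList 0 with ⟨core, dep⟩
      cases core <;> simp
      split_ifs <;> simp
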